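-- pv_equiv track=rewrite | github.com/tfcc13/FEUP_FP_1Y1S | PG/P4/The greatest number.py | greatest
-- ===== SOURCE A (Python) =====
-- def greatest(num):
--     lista = []
--     final = 0
--     while num > 0:
--         n = num % 10
--         num = num // 10
--         lista.append(n)
--     lista = sorted(lista)
--
--     for i, number in enumerate(lista,start=0):
--         final = final + number * 10 ** i
--
--     return final
-- ===== SOURCE B (Python) =====
-- def _place(d, m):
--     # m's digits already run largest-to-smallest; slot d in so they stay that way
--     if m <= 0 or m % 10 >= d:
--         return m * 10 + d
--     return _place(d, m // 10) * 10 + m % 10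
--
--
-- def greatest(num):
--     if num <= 0:
--         return 0
--     return _place(num % 10, greatest(num // 10))
-- ===== Notes on version B (the rewrite author's own statement) =====
-- stated objective: alternative
-- what changed: B never builds a digit list: it recursively peels digits and inserts each one directly into the partial answer by arithmetic (shift/split of the accumulated integer), an insertion sort performed on the number itself instead of A's list + sorted() + positional 10**i summation.
import Mathlib
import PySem

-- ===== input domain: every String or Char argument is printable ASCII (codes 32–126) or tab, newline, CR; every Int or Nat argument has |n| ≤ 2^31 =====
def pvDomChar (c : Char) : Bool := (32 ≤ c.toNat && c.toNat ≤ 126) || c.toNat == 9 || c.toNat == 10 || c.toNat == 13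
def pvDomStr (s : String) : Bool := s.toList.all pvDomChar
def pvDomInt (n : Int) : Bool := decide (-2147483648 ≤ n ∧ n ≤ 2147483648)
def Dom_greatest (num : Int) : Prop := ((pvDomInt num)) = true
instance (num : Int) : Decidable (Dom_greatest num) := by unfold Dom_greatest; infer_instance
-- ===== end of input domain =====

-- B builds the answer with no list at all: each peeled digit is inserted into the
-- partially built integer by shift/split arithmetic (insertion sort on the number itself),
-- replacing A's digit list, sorted() and positional 10**i summation.

-- termination measure for all the digit-peeling recursions (cited by name in decreasing_by)
lemma pvDecLemma (n : Int) (h : 0 < n) : (PySem.Int.floordiv n 10).toNat < n.toNat := by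
  rw [PySem.Int.floordiv_eq_ediv_of_pos (by omega : (0:Int) < 10)]
  have h1 : n / 10 < n := by apply Int.ediv_lt_of_lt_mul (by omega); omega
  have h2 : 0 ≤ n / 10 := Int.ediv_nonneg (by omega) (by omega)
  omega

-- ===== PORT A =====
-- while num > 0: n = num % 10; num = num // 10; lista.append(n)
def greatestLoopA (num : Int) (lista : List Int) : List Int :=
  if num > 0 then
    greatestLoopA (PySem.Int.floordiv num 10) (lista ++ [PySem.Int.mod num 10])
  else lista
termination_by num.toNat
decreasing_by exact pvDecLemma num (by omega)

def greatest (num : Int) : Int :=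
  let lista := greatestLoopA num []
  let lista := PySem.List.sorted lista (fun x => x) false
  -- 10 ** i: the enumerate index i starts at 0 and only grows, so '.toNat' is exact here
  (PySem.List.enumerate lista 0).foldl (fun final p => final + p.2 * 10 ^ p.1.toNat) 0

-- ===== PORT B =====
-- if m <= 0 or m % 10 >= d: return m * 10 + d
-- return _place(d, m // 10) * 10 + m % 10
def placeDigit (d m : Int) : Int :=
  if m ≤ 0 ∨ PySem.Int.mod m 10 ≥ d then m * 10 + d
  else placeDigit d (PySem.Int.floordiv m 10) * 10 + PySem.Int.mod m 10
termination_by m.toNat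
decreasing_by exact pvDecLemma m (by rw [not_or] at *; omega)

-- if num <= 0: return 0
-- return _place(num % 10, greatest(num // 10))
def greatest_alt (num : Int) : Int :=
  if num ≤ 0 then 0
  else placeDigit (PySem.Int.mod num 10) (greatest_alt (PySem.Int.floordiv num 10))
termination_by num.toNat
decreasing_by exact pvDecLemma num (by omega)

-- ===== PRECONDITION & SPEC =====
def Spec_greatest (num : Int) (out : Int) : Prop := out = greatest_alt num
instance (num : Int) (out : Int) : Decidable (Spec_greatest num out) := by unfold Spec_greatest; infer_instance

-- ===== CLAIM (what is proved, stated in full; the proofs are below) =====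
def Claim_equal_greatest : Prop := ∀ (num : Int), Dom_greatest num → Spec_greatest num (greatest num)

-- ===== LEMMAS AND PROOFS =====

-- The digit list A builds (units digit first).
def pvDigits (num : Int) : List Int :=
  if num > 0 then PySem.Int.mod num 10 :: pvDigits (PySem.Int.floordiv num 10) else []
termination_by num.toNat
decreasing_by exact pvDecLemma num (by omega)

-- value of a digit list, least-significant digit first
def pvPos : List Int → Int
  | [] => 0
  | d :: t => d + 10 * pvPos t

-- ordered insertion into an ascending (units-first) digit list
def pvIns (d : Int) : List Int → List Int
  | [] => [d]
  | h :: t => if d ≤ h then d :: h :: t else h :: pvIns d t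

lemma pvDigits_mem (num d : Int) (h : d ∈ pvDigits num) : 0 ≤ d ∧ d < 10 := by
  induction num using pvDigits.induct with
  | case1 n hn ih =>
    rw [pvDigits, if_pos hn] at h
    rcases List.mem_cons.mp h with rfl | hm
    · exact ⟨PySem.Int.mod_nonneg _ (by omega : (0:Int) < 10), PySem.Int.mod_lt _ (by omega : (0:Int) < 10)⟩
    · exact ih hm
  | case2 n hn => rw [pvDigits, if_neg hn] at h; simp at h

lemma loopA_eq (num : Int) (acc : List Int) : greatestLoopA num acc = acc ++ pvDigits num := by
  induction num using pvDigits.induct generalizing acc with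
  | case1 n hn ih =>
    rw [greatestLoopA, if_pos hn, pvDigits, if_pos hn, ih]
    simp
  | case2 n hn => rw [greatestLoopA, if_neg hn, pvDigits, if_neg hn]; simp

lemma A_fold (ys : List Int) (s acc : Int) (hs : 0 ≤ s) :
    (PySem.List.enumerate ys s).foldl (fun final p => final + p.2 * 10 ^ p.1.toNat) acc
      = acc + 10 ^ s.toNat * pvPos ys := by
  induction ys generalizing s acc with
  | nil => simp [PySem.List.enumerate_nil, pvPos]
  | cons d t ih =>
    rw [PySem.List.enumerate_cons, List.foldl_cons, ih _ _ (by omega)]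
    have : (s + 1).toNat = s.toNat + 1 := by omega
    rw [this, pvPos]
    ring

lemma pvPos_nonneg (ds : List Int) (h : ∀ x ∈ ds, 0 ≤ x) : 0 ≤ pvPos ds := by
  induction ds with
  | nil => simp [pvPos]
  | cons d t ih =>
    have hd := h d (List.mem_cons_self ..)
    have ht := ih (fun x hx => h x (List.mem_cons_of_mem _ hx))
    rw [pvPos]; omega

lemma pvPos_eq_zero_iff (ds : List Int) (h : ∀ x ∈ ds, 0 ≤ x) :
    pvPos ds = 0 ↔ ∀ x ∈ ds, x = 0 := by
  induction ds with
  | nil => simp [pvPos]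
  | cons d t ih =>
    have hd := h d (List.mem_cons_self ..)
    have ht := pvPos_nonneg t (fun x hx => h x (List.mem_cons_of_mem _ hx))
    rw [pvPos]
    constructor
    · intro h0 x hx
      have hdz : d = 0 ∧ pvPos t = 0 := by omega
      rcases List.mem_cons.mp hx with rfl | hxt
      · exact hdz.1
      · exact ((ih (fun x hx => h x (List.mem_cons_of_mem _ hx))).mp hdz.2) x hxt
    · intro hall
      have h1 : d = 0 := hall d (List.mem_cons_self ..)
      have h2 : pvPos t = 0 := (ih (fun x hx => h x (List.mem_cons_of_mem _ hx))).mpr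
        (fun x hx => hall x (List.mem_cons_of_mem _ hx))
      omega

lemma pvPos_pvDigits (num : Int) : 0 ≤ num → pvPos (pvDigits num) = num := by
  induction num using pvDigits.induct with
  | case1 n hn ih =>
    intro _
    rw [pvDigits, if_pos hn, pvPos]
    rw [PySem.Int.floordiv_eq_ediv_of_pos (by omega : (0:Int) < 10),
        PySem.Int.mod_eq_emod_of_pos (by omega : (0:Int) < 10)] at *
    have := ih (by positivity)
    omega
  | case2 n hn =>
    intro h0
    rw [pvDigits, if_neg hn, pvPos]
    omega

lemma pvIns_perm (d : Int) (ds : List Int) : (pvIns d ds).Perm (d :: ds) := by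
  induction ds with
  | nil => simp [pvIns]
  | cons h t ih =>
    rw [pvIns]
    split_ifs with hc
    · exact List.Perm.refl _
    · exact (List.Perm.cons h ih).trans (List.Perm.swap d h t)

lemma pvIns_mem (d x : Int) (ds : List Int) (h : x ∈ pvIns d ds) : x = d ∨ x ∈ ds := by
  have := (pvIns_perm d ds).mem_iff.mp h
  simpa using this

lemma pvIns_pairwise (d : Int) (ds : List Int) (h : ds.Pairwise (· ≤ ·)) :
    (pvIns d ds).Pairwise (· ≤ ·) := by
  induction ds with
  | nil => simp [pvIns]
  | cons a t ih =>
    rcases List.pairwise_cons.mp h with ⟨hat, hpt⟩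
    rw [pvIns]
    split_ifs with hc
    · refine List.pairwise_cons.mpr ⟨?_, List.pairwise_cons.mpr ⟨hat, hpt⟩⟩
      intro y hy
      rcases List.mem_cons.mp hy with rfl | hyt
      · exact hc
      · exact le_trans hc (hat y hyt)
    · refine List.pairwise_cons.mpr ⟨?_, ih hpt⟩
      intro y hy
      rcases pvIns_mem d y t hy with rfl | hyt
      · omega
      · exact hat y hyt

-- the heart of B: inserting digit d into the number whose ascending units-first
-- digit list is ds is ordered list insertion, read through pvPos
lemma place_eq (d : Int) (ds : List Int) (hpw : ds.Pairwise (· ≤ ·)) (hmem : ∀ x ∈ ds, 0 ≤ x ∧ x < 10)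
    (hz : pvPos ds = 0 → ds = []) :
    placeDigit d (pvPos ds) = pvPos (pvIns d ds) := by
  induction ds with
  | nil =>
    rw [placeDigit]
    simp [pvPos, pvIns]
  | cons h t ih =>
    have hh := hmem h (List.mem_cons_self ..)
    have htmem : ∀ x ∈ t, 0 ≤ x ∧ x < 10 := fun x hx => hmem x (List.mem_cons_of_mem _ hx)
    have htnn : 0 ≤ pvPos t := pvPos_nonneg t (fun x hx => (htmem x hx).1)
    rcases List.pairwise_cons.mp hpw with ⟨hht, hpt⟩
    have hm : pvPos (h :: t) = h + 10 * pvPos t := rfl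
    have hmpos : 0 < pvPos (h :: t) := by
      have : pvPos (h :: t) ≠ 0 := fun h0 => by simpa using hz h0
      rw [hm]; omega
    have hmod : PySem.Int.mod (pvPos (h :: t)) 10 = h := by
      rw [PySem.Int.mod_eq_emod_of_pos (by omega : (0:Int) < 10), hm]
      omega
    have hdiv : PySem.Int.floordiv (pvPos (h :: t)) 10 = pvPos t := by
      rw [PySem.Int.floordiv_eq_ediv_of_pos (by omega : (0:Int) < 10), hm]
      omega
    rw [placeDigit, hmod, hdiv, pvIns]
    split_ifs with hc1 hc2 hc2
    · -- d ≤ h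
      rw [hm]
      show _ = pvPos (d :: h :: t)
      rw [pvPos, pvPos]
      rcases hc1 with hle | hge
      · omega
      · ring
    · omega
    · omega
    · -- h < d: recurse
      have hzt : pvPos t = 0 → t = [] := by
        intro h0
        by_contra hne
        have hall : ∀ x ∈ t, x = 0 := (pvPos_eq_zero_iff t (fun x hx => (htmem x hx).1)).mp h0
        rcases List.exists_mem_of_ne_nil t hne with ⟨y, hy⟩
        have : h ≤ y := hht y hy
        have : y = 0 := hall y hy
        have : h = 0 := by omega
        have : pvPos (h :: t) = 0 := by rw [hm]; omega
        simpa using hz this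
      rw [ih hpt htmem hzt]
      show _ = pvPos (h :: pvIns d t)
      rw [pvPos]
      ring

lemma altB (num : Int) :
    greatest_alt num = pvPos (PySem.List.sorted (pvDigits num) (fun x => x) false) := by
  induction num using pvDigits.induct with
  | case1 n hn ih =>
    rw [greatest_alt, if_neg (by omega), ih]
    set d := PySem.Int.mod n 10 with hdv
    set S' := PySem.List.sorted (pvDigits (PySem.Int.floordiv n 10)) (fun x => x) false with hS'
    have hmemS' : ∀ x ∈ S', 0 ≤ x ∧ x < 10 := by
      intro x hx
      exact pvDigits_mem _ x ((PySem.List.mem_sorted _ _ _ _).mp hx)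
    have hpwS' : S'.Pairwise (· ≤ ·) := by
      rw [hS']
      exact PySem.List.sorted_pairwise (pvDigits (PySem.Int.floordiv n 10)) (fun x => x)
    have hzS' : pvPos S' = 0 → S' = [] := by
      intro h0
      by_cases hpos : PySem.Int.floordiv n 10 > 0
      · exfalso
        have hall : ∀ x ∈ S', x = 0 := (pvPos_eq_zero_iff S' (fun x hx => (hmemS' x hx).1)).mp h0
        have hallD : ∀ x ∈ pvDigits (PySem.Int.floordiv n 10), x = 0 := by
          intro x hx
          exact hall x ((PySem.List.mem_sorted _ _ _ _).mpr hx)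
        have : pvPos (pvDigits (PySem.Int.floordiv n 10)) = 0 :=
          (pvPos_eq_zero_iff _ (fun x hx => (pvDigits_mem _ x hx).1)).mpr hallD
        rw [pvPos_pvDigits _ (by omega)] at this
        omega
      · rw [hS', pvDigits, if_neg hpos]
        rfl
    rw [place_eq d S' hpwS' hmemS' hzS']
    congr 1
    symm
    apply PySem.List.sorted_id_eq_of_perm_of_pairwise
    · refine (pvIns_perm d S').trans ?_
      rw [pvDigits, if_pos hn]
      exact List.Perm.cons _ (by simpa [hS'] using PySem.List.sorted_perm (pvDigits (PySem.Int.floordiv n 10)) (fun x => x) false)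
    · exact pvIns_pairwise d S' hpwS'
  | case2 n hn =>
    rw [greatest_alt, if_pos (by omega), pvDigits, if_neg hn]
    rfl

lemma main_eq (num : Int) : greatest num = greatest_alt num := by
  have hL : greatestLoopA num [] = pvDigits num := by simpa using loopA_eq num []
  have hA : greatest num = pvPos (PySem.List.sorted (pvDigits num) (fun x => x) false) := by
    unfold greatest
    rw [hL, A_fold _ 0 0 (le_refl 0)]
    norm_num
  rw [hA, altB]

-- ===== VERDICT (by name: the statement is the Claim_ definition above) =====
theorem greatest_spec : Claim_equal_greatest := by
  intro num _
  unfold Spec_greatest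
  exact main_eq num
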